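-- pv_equiv track=rewrite | github.com/HollandTS/SequenceMaster | ini_processor.py | build_frame_grid
-- ===== SOURCE A (Python) =====
-- def build_frame_grid(data, mode, facings, total_frames):
--     """
--     Returns:
--         frames_grid: {animation: {direction: [frame indices]}}
--         shadows_grid: {animation: {direction: [shadow frame indices]}}
--     """
--     frames_grid = {}
--     shadows_grid = {}
--     if mode == 'Infantry':
--         DIR_ORDER = ["N", "NW", "W", "SW", "S", "SE", "E", "NE"]
--         for anim, value in data.items():
--             parts = [p.strip() for p in value.split(",") if p.strip()]
--             if len(parts) < 3:
--                 continue
--             start = int(parts[0])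
--             count = int(parts[1])
--             skip = int(parts[2])
--             frames_grid[anim] = {}
--             shadows_grid[anim] = {}
--             for i, dir_name in enumerate(DIR_ORDER):
--                 dir_frames = []
--                 shadow_frames = []
--                 for j in range(count):
--                     idx = start + i * skip + j
--                     dir_frames.append(idx)
--                     # Shadow frame index is offset by half the total frames
--                     shadow_idx = idx + (total_frames // 2)
--                     shadow_frames.append(shadow_idx)
--                 frames_grid[anim][dir_name] = dir_frames
--                 shadows_grid[anim][dir_name] = shadow_frames
--     elif mode == 'Vehicle':
--         # Directions are clockwise, facings can be 8/16/32/64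
--         VEHICLE_DIR_ORDER = ["N", "NE", "E", "SE", "S", "SW", "W", "NW"]
--         vehicle_anims = [
--             ("Standing", "StartStandFrame", "StandingFrames"),
--             ("Walk", "StartWalkFrame", "WalkFrames"),
--             ("Death", "StartDeathFrame", "DeathFrames"),
--             ("Firing", "StartFiringFrame", "FiringFrames"),
--             ("Idle", "StartIdleFrame", "IdleFrames"),
--         ]
--         for anim, start_key, count_key in vehicle_anims:
--             if start_key in data and count_key in data:
--                 start = int(data[start_key])
--                 count = int(data[count_key])
--                 frames_grid[count_key] = {}
--                 shadows_grid[count_key] = {}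
--                 for i in range(facings):
--                     if facings == 8:
--                         dir_name = VEHICLE_DIR_ORDER[i]
--                     else:
--                         dir_name = f"D{i+1}"  # D1, D2, ... for 16/32/64 facings
--                     dir_frames = []
--                     shadow_frames = []
--                     for j in range(count):
--                         idx = start + i * count + j
--                         dir_frames.append(idx)
--                         shadow_idx = idx + (total_frames // 2)
--                         shadow_frames.append(shadow_idx)
--                     frames_grid[count_key][dir_name] = dir_frames
--                     shadows_grid[count_key][dir_name] = shadow_frames
--     return frames_grid, shadows_grid
-- ===== SOURCE B (Python) =====
-- def build_frame_grid(data, mode, facings, total_frames):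
--     # B: builds frames_grid with closed-form ranges (no inner append loops),
--     # then derives shadows_grid in a separate second pass over frames_grid.
--     frames_grid = {}
--     if mode == 'Infantry':
--         DIR_ORDER = ["N", "NW", "W", "SW", "S", "SE", "E", "NE"]
--         for anim, value in data.items():
--             parts = [p.strip() for p in value.split(",") if p.strip()]
--             if len(parts) < 3:
--                 continue
--             start = int(parts[0])
--             count = int(parts[1])
--             skip = int(parts[2])
--             frames_grid[anim] = {
--                 dir_name: list(range(start + i * skip, start + i * skip + count))
--                 for i, dir_name in enumerate(DIR_ORDER)
--             }
--     elif mode == 'Vehicle':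
--         VEHICLE_DIR_ORDER = ["N", "NE", "E", "SE", "S", "SW", "W", "NW"]
--         vehicle_anims = [
--             ("Standing", "StartStandFrame", "StandingFrames"),
--             ("Walk", "StartWalkFrame", "WalkFrames"),
--             ("Death", "StartDeathFrame", "DeathFrames"),
--             ("Firing", "StartFiringFrame", "FiringFrames"),
--             ("Idle", "StartIdleFrame", "IdleFrames"),
--         ]
--         for anim, start_key, count_key in vehicle_anims:
--             if start_key in data and count_key in data:
--                 start = int(data[start_key])
--                 count = int(data[count_key])
--                 if facings == 8:
--                     names = VEHICLE_DIR_ORDER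
--                 else:
--                     names = ["D%d" % (i + 1) for i in range(facings)]
--                 frames_grid[count_key] = {
--                     dir_name: list(range(start + i * count, start + i * count + count))
--                     for i, dir_name in enumerate(names)
--                 }
--     half = total_frames // 2
--     shadows_grid = {
--         anim: {d: [f + half for f in frames] for d, frames in dirs.items()}
--         for anim, dirs in frames_grid.items()
--     }
--     return frames_grid, shadows_grid
-- ===== Notes on version B (the rewrite author's own statement) =====
-- stated objective: simpler
-- what changed: B builds frames_grid with closed-form list(range(...)) per direction instead of A's inner append loops, and derives shadows_grid in a single separate second pass over the finished frames_grid (frames + total_frames//2) instead of maintaining two parallel grids through every loop.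
import Mathlib
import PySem

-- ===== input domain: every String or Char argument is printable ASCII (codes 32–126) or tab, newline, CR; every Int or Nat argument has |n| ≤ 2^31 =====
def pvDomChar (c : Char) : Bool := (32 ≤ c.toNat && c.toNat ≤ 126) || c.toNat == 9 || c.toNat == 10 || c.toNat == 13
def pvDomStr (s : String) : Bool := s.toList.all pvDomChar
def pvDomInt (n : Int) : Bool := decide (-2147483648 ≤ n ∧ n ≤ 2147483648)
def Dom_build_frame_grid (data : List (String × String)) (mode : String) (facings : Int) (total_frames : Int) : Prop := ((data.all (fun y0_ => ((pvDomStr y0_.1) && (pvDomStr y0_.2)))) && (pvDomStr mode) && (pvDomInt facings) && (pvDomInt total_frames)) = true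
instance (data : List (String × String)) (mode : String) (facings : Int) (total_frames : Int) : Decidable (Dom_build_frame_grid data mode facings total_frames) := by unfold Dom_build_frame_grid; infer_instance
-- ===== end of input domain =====

-- B builds frames_grid with closed-form ranges per direction and derives shadows_grid in a
-- separate second pass (frames + total_frames//2) instead of A's two parallel append loops ("simpler").

-- shared literal constants of both Pythons
def pvInfDirs : List String := ["N", "NW", "W", "SW", "S", "SE", "E", "NE"]
def pvVehDirs : List String := ["N", "NE", "E", "SE", "S", "SW", "W", "NW"]
def pvVehAnims : List (String × String × String) :=
  [("Standing", "StartStandFrame", "StandingFrames"),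
   ("Walk", "StartWalkFrame", "WalkFrames"),
   ("Death", "StartDeathFrame", "DeathFrames"),
   ("Firing", "StartFiringFrame", "FiringFrames"),
   ("Idle", "StartIdleFrame", "IdleFrames")]
-- [p.strip() for p in value.split(",") if p.strip()]; sep "," is nonempty so split? is always some
def pvParts (v : String) : List String :=
  (((PySem.Str.split? v ",").getD []).map PySem.Str.strip).filter (fun p => p ≠ "")
-- int(s); the `none` (ValueError) case is excluded by Pre_, the .getD 0 is never reached there
def pvParse (s : String) : Int := (PySem.Int.ofStr? s).getD 0

-- ===== PORT A =====
def build_frame_grid (data : List (String × String)) (mode : String) (facings : Int) (total_frames : Int) : (List (String × List (String × List Int))) × (List (String × List (String × List Int))) :=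
  let d := PySem.Dict.ofList data
  if mode == "Infantry" then
    -- all dict keys written are fresh (dict keys are unique, DIR_ORDER entries distinct),
    -- so each Python dict assignment is an append
    d.items.foldl (fun acc kv =>
      let parts := pvParts kv.2
      if parts.length < 3 then acc
      else
        let start := pvParse (parts.getD 0 "")
        let count := pvParse (parts.getD 1 "")
        let skip := pvParse (parts.getD 2 "")
        let inner := (PySem.List.enumerate pvInfDirs 0).foldl (fun acc2 p =>
          let fs := (PySem.List.pyRange 0 count 1).foldl (fun dj j =>
              (dj.1 ++ [start + p.1 * skip + j],
               dj.2 ++ [start + p.1 * skip + j + PySem.Int.floordiv total_frames 2]))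
            (([] : List Int), ([] : List Int))
          (acc2.1 ++ [(p.2, fs.1)], acc2.2 ++ [(p.2, fs.2)]))
          (([] : List (String × List Int)), ([] : List (String × List Int)))
        (acc.1 ++ [(kv.1, inner.1)], acc.2 ++ [(kv.1, inner.2)]))
      (([] : List (String × List (String × List Int))), ([] : List (String × List (String × List Int))))
  else if mode == "Vehicle" then
    pvVehAnims.foldl (fun acc t =>
      if d.contains t.2.1 && d.contains t.2.2 then
        let start := pvParse (d.getD t.2.1 "")
        let count := pvParse (d.getD t.2.2 "")
        let inner := (PySem.List.pyRange 0 facings 1).foldl (fun acc2 i =>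
          let dir_name := if facings == 8 then PySem.List.pyGetD pvVehDirs i ""
                          else "D" ++ PySem.Int.toStr (i + 1)
          let fs := (PySem.List.pyRange 0 count 1).foldl (fun dj j =>
              (dj.1 ++ [start + i * count + j],
               dj.2 ++ [start + i * count + j + PySem.Int.floordiv total_frames 2]))
            (([] : List Int), ([] : List Int))
          (acc2.1 ++ [(dir_name, fs.1)], acc2.2 ++ [(dir_name, fs.2)]))
          (([] : List (String × List Int)), ([] : List (String × List Int)))
        (acc.1 ++ [(t.2.2, inner.1)], acc.2 ++ [(t.2.2, inner.2)])
      else acc)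
      (([] : List (String × List (String × List Int))), ([] : List (String × List (String × List Int))))
  else ([], [])

-- ===== PORT B =====
-- second pass of Source B: shadows_grid derived from the finished frames_grid
def pvShadow (half : Int) (fg : List (String × List (String × List Int))) : List (String × List (String × List Int)) :=
  fg.map (fun a => (a.1, a.2.map (fun dp => (dp.1, dp.2.map (fun f => f + half)))))

def build_frame_grid_alt (data : List (String × String)) (mode : String) (facings : Int) (total_frames : Int) : (List (String × List (String × List Int))) × (List (String × List (String × List Int))) :=
  let d := PySem.Dict.ofList data
  let fg :=
    if mode == "Infantry" then
      d.items.foldl (fun acc kv =>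
        let parts := pvParts kv.2
        if parts.length < 3 then acc
        else
          let start := pvParse (parts.getD 0 "")
          let count := pvParse (parts.getD 1 "")
          let skip := pvParse (parts.getD 2 "")
          acc ++ [(kv.1, (PySem.List.enumerate pvInfDirs 0).map (fun p =>
            (p.2, PySem.List.pyRange (start + p.1 * skip) (start + p.1 * skip + count) 1)))])
        ([] : List (String × List (String × List Int)))
    else if mode == "Vehicle" then
      pvVehAnims.foldl (fun acc t =>
        if d.contains t.2.1 && d.contains t.2.2 then
          let start := pvParse (d.getD t.2.1 "")
          let count := pvParse (d.getD t.2.2 "")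
          let names := if facings == 8 then pvVehDirs
                       else (PySem.List.pyRange 0 facings 1).map (fun i => "D" ++ PySem.Int.toStr (i + 1))
          acc ++ [(t.2.2, (PySem.List.enumerate names 0).map (fun p =>
            (p.2, PySem.List.pyRange (start + p.1 * count) (start + p.1 * count + count) 1)))]
        else acc)
        ([] : List (String × List (String × List Int)))
    else []
  (fg, pvShadow (PySem.Int.floordiv total_frames 2) fg)

-- ===== PRECONDITION & SPEC =====
-- Pre_ excludes exactly the inputs where Python A raises ValueError: an int() applied to a
-- non-integer string (Infantry parts[0..2] when len(parts) >= 3; Vehicle start/count values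
-- when both keys are present).
def Pre_build_frame_grid (data : List (String × String)) (mode : String) (facings : Int) (total_frames : Int) : Prop :=
  (if mode == "Infantry" then
    (PySem.Dict.ofList data).items.all (fun kv =>
      let parts := pvParts kv.2
      decide (parts.length < 3) ||
        ((PySem.Int.ofStr? (parts.getD 0 "")).isSome &&
         (PySem.Int.ofStr? (parts.getD 1 "")).isSome &&
         (PySem.Int.ofStr? (parts.getD 2 "")).isSome))
  else if mode == "Vehicle" then
    pvVehAnims.all (fun t =>
      !((PySem.Dict.ofList data).contains t.2.1 && (PySem.Dict.ofList data).contains t.2.2) ||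
        ((PySem.Int.ofStr? ((PySem.Dict.ofList data).getD t.2.1 "")).isSome &&
         (PySem.Int.ofStr? ((PySem.Dict.ofList data).getD t.2.2 "")).isSome))
  else true) = true
instance (data : List (String × String)) (mode : String) (facings : Int) (total_frames : Int) : Decidable (Pre_build_frame_grid data mode facings total_frames) := by unfold Pre_build_frame_grid; infer_instance

def pvWitness_build_frame_grid : (List (String × String)) × String × Int × Int :=
  ([("Walk", "0, 2, 1"), ("Idle", "4,1,2")], "Infantry", 8, 10)

def Spec_build_frame_grid (data : List (String × String)) (mode : String) (facings : Int) (total_frames : Int) (out : (List (String × List (String × List Int))) × (List (String × List (String × List Int)))) : Prop := out = build_frame_grid_alt data mode facings total_frames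
instance (data : List (String × String)) (mode : String) (facings : Int) (total_frames : Int) (out : (List (String × List (String × List Int))) × (List (String × List (String × List Int)))) : Decidable (Spec_build_frame_grid data mode facings total_frames out) := by unfold Spec_build_frame_grid; exact instDecidableEqProd _ _

-- ===== CLAIM (what is proved, stated in full; the proofs are below) =====
def Claim_equal_build_frame_grid : Prop := ∀ (data : List (String × String)) (mode : String) (facings : Int) (total_frames : Int), Dom_build_frame_grid data mode facings total_frames → Pre_build_frame_grid data mode facings total_frames → Spec_build_frame_grid data mode facings total_frames (build_frame_grid data mode facings total_frames)

-- ===== LEMMAS AND PROOFS =====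

theorem foldl_pair_append {α β γ : Type} (f : α → β) (g : α → γ) (l : List α) (acc : List β × List γ) :
    l.foldl (fun dj x => (dj.1 ++ [f x], dj.2 ++ [g x])) acc = (acc.1 ++ l.map f, acc.2 ++ l.map g) := by
  induction l generalizing acc with
  | nil => simp
  | cons x xs ih => simp [List.foldl, ih]

theorem map_add_pyRange (base c : Int) :
    (PySem.List.pyRange 0 c 1).map (fun j => base + j) = PySem.List.pyRange base (base + c) 1 := by
  simp [PySem.List.pyRange_one]

theorem fold_shadow_inv {α β : Type} (sh : β → β) (fA : β × β → α → β × β) (fB : β → α → β)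
    (h : ∀ b x, fA (b, sh b) x = (fB b x, sh (fB b x))) :
    ∀ (l : List α) (b : β), l.foldl fA (b, sh b) = (l.foldl fB b, sh (l.foldl fB b)) := by
  intro l
  induction l with
  | nil => intro b; rfl
  | cons x xs ih => intro b; simp only [List.foldl, h b x]; exact ih _

theorem pyRange_toNat (n : Int) : PySem.List.pyRange 0 ((n.toNat : Int)) 1 = PySem.List.pyRange 0 n 1 := by
  have h : (max n 0).toNat = n.toNat := by omega
  simp [PySem.List.pyRange_one, h]

theorem veh_enum_eq {α : Type} (facings : Int) (f : Int → α) :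
    (PySem.List.enumerate (if facings = 8 then pvVehDirs
        else (PySem.List.pyRange 0 facings 1).map (fun i => "D" ++ PySem.Int.toStr (i + 1))) 0).map
      (fun p => (p.2, f p.1)) =
    (PySem.List.pyRange 0 facings 1).map (fun i =>
      ((if facings = 8 then PySem.List.pyGetD pvVehDirs i "" else "D" ++ PySem.Int.toStr (i + 1)), f i)) := by
  by_cases hb : facings = 8
  · subst hb
    rfl
  · simp only [hb, if_false]
    rw [PySem.List.enumerate_eq_map_pyRange (d := "")]
    simp only [List.map_map]
    have hlen : PySem.List.len (List.map (fun i => "D" ++ PySem.Int.toStr (i + 1)) (PySem.List.pyRange 0 facings 1)) = ((facings.toNat : Int)) := by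
      simp [PySem.List.len_eq, PySem.List.length_pyRange_one]
    rw [hlen, pyRange_toNat]
    refine List.map_congr_left (fun j hj => ?_)
    have hj' := (PySem.List.mem_pyRange_one).mp hj
    simp only [Function.comp_apply]
    rw [PySem.List.pyGetD_map_pyRange_of_nonneg _ _ _ _ (by omega) (by omega)]

theorem veh1 (facings start count : Int) :
    (PySem.List.enumerate (if facings = 8 then pvVehDirs
        else (PySem.List.pyRange 0 facings 1).map (fun i => "D" ++ PySem.Int.toStr (i + 1))) 0).map
      (fun p => (p.2, PySem.List.pyRange (start + p.1 * count) (start + p.1 * count + count) 1)) =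
    (PySem.List.pyRange 0 facings 1).map (fun i =>
      ((if facings = 8 then PySem.List.pyGetD pvVehDirs i "" else "D" ++ PySem.Int.toStr (i + 1)),
       PySem.List.pyRange (start + i * count) (start + i * count + count) 1)) :=
  veh_enum_eq facings (fun i => PySem.List.pyRange (start + i * count) (start + i * count + count) 1)

theorem map_add_pyRange_shadow (base c h : Int) :
    (PySem.List.pyRange 0 c 1).map (fun j => base + j + h) =
    (PySem.List.pyRange base (base + c) 1).map (fun x => x + h) := by
  rw [← map_add_pyRange base c, List.map_map]
  rfl

theorem infantry_eq (d : PySem.Dict String String) (tf : Int) :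
    d.items.foldl (fun acc kv =>
      let parts := pvParts kv.2
      if parts.length < 3 then acc
      else
        let start := pvParse (parts.getD 0 "")
        let count := pvParse (parts.getD 1 "")
        let skip := pvParse (parts.getD 2 "")
        let inner := (PySem.List.enumerate pvInfDirs 0).foldl (fun acc2 p =>
          let fs := (PySem.List.pyRange 0 count 1).foldl (fun dj j =>
              (dj.1 ++ [start + p.1 * skip + j],
               dj.2 ++ [start + p.1 * skip + j + PySem.Int.floordiv tf 2]))
            (([] : List Int), ([] : List Int))
          (acc2.1 ++ [(p.2, fs.1)], acc2.2 ++ [(p.2, fs.2)]))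
          (([] : List (String × List Int)), ([] : List (String × List Int)))
        (acc.1 ++ [(kv.1, inner.1)], acc.2 ++ [(kv.1, inner.2)]))
      (([] : List (String × List (String × List Int))), ([] : List (String × List (String × List Int)))) =
    ((d.items.foldl (fun acc kv =>
        let parts := pvParts kv.2
        if parts.length < 3 then acc
        else
          let start := pvParse (parts.getD 0 "")
          let count := pvParse (parts.getD 1 "")
          let skip := pvParse (parts.getD 2 "")
          acc ++ [(kv.1, (PySem.List.enumerate pvInfDirs 0).map (fun p =>
            (p.2, PySem.List.pyRange (start + p.1 * skip) (start + p.1 * skip + count) 1)))])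
        ([] : List (String × List (String × List Int)))),
     pvShadow (PySem.Int.floordiv tf 2) (d.items.foldl (fun acc kv =>
        let parts := pvParts kv.2
        if parts.length < 3 then acc
        else
          let start := pvParse (parts.getD 0 "")
          let count := pvParse (parts.getD 1 "")
          let skip := pvParse (parts.getD 2 "")
          acc ++ [(kv.1, (PySem.List.enumerate pvInfDirs 0).map (fun p =>
            (p.2, PySem.List.pyRange (start + p.1 * skip) (start + p.1 * skip + count) 1)))])
        ([] : List (String × List (String × List Int))))) := by
  have key := fold_shadow_inv (pvShadow (PySem.Int.floordiv tf 2))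
    (fun acc kv =>
      let parts := pvParts kv.2
      if parts.length < 3 then acc
      else
        let start := pvParse (parts.getD 0 "")
        let count := pvParse (parts.getD 1 "")
        let skip := pvParse (parts.getD 2 "")
        let inner := (PySem.List.enumerate pvInfDirs 0).foldl (fun acc2 p =>
          let fs := (PySem.List.pyRange 0 count 1).foldl (fun dj j =>
              (dj.1 ++ [start + p.1 * skip + j],
               dj.2 ++ [start + p.1 * skip + j + PySem.Int.floordiv tf 2]))
            (([] : List Int), ([] : List Int))
          (acc2.1 ++ [(p.2, fs.1)], acc2.2 ++ [(p.2, fs.2)]))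
          (([] : List (String × List Int)), ([] : List (String × List Int)))
        (acc.1 ++ [(kv.1, inner.1)], acc.2 ++ [(kv.1, inner.2)]))
    (fun acc kv =>
      let parts := pvParts kv.2
      if parts.length < 3 then acc
      else
        let start := pvParse (parts.getD 0 "")
        let count := pvParse (parts.getD 1 "")
        let skip := pvParse (parts.getD 2 "")
        acc ++ [(kv.1, (PySem.List.enumerate pvInfDirs 0).map (fun p =>
          (p.2, PySem.List.pyRange (start + p.1 * skip) (start + p.1 * skip + count) 1)))])
    (by
      intro b kv
      by_cases hp : (pvParts kv.2).length < 3
      · simp [hp]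
      · simp [hp, foldl_pair_append, map_add_pyRange, map_add_pyRange_shadow, pvShadow, List.map_map])
    d.items []
  simpa [pvShadow] using key

theorem vehicle_eq (d : PySem.Dict String String) (facings tf : Int) :
    pvVehAnims.foldl (fun acc t =>
      if d.contains t.2.1 && d.contains t.2.2 then
        let start := pvParse (d.getD t.2.1 "")
        let count := pvParse (d.getD t.2.2 "")
        let inner := (PySem.List.pyRange 0 facings 1).foldl (fun acc2 i =>
          let dir_name := if facings == 8 then PySem.List.pyGetD pvVehDirs i ""
                          else "D" ++ PySem.Int.toStr (i + 1)
          let fs := (PySem.List.pyRange 0 count 1).foldl (fun dj j =>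
              (dj.1 ++ [start + i * count + j],
               dj.2 ++ [start + i * count + j + PySem.Int.floordiv tf 2]))
            (([] : List Int), ([] : List Int))
          (acc2.1 ++ [(dir_name, fs.1)], acc2.2 ++ [(dir_name, fs.2)]))
          (([] : List (String × List Int)), ([] : List (String × List Int)))
        (acc.1 ++ [(t.2.2, inner.1)], acc.2 ++ [(t.2.2, inner.2)])
      else acc)
      (([] : List (String × List (String × List Int))), ([] : List (String × List (String × List Int)))) =
    ((pvVehAnims.foldl (fun acc t =>
        if d.contains t.2.1 && d.contains t.2.2 then
          let start := pvParse (d.getD t.2.1 "")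
          let count := pvParse (d.getD t.2.2 "")
          let names := if facings == 8 then pvVehDirs
                       else (PySem.List.pyRange 0 facings 1).map (fun i => "D" ++ PySem.Int.toStr (i + 1))
          acc ++ [(t.2.2, (PySem.List.enumerate names 0).map (fun p =>
            (p.2, PySem.List.pyRange (start + p.1 * count) (start + p.1 * count + count) 1)))]
        else acc)
        ([] : List (String × List (String × List Int)))),
     pvShadow (PySem.Int.floordiv tf 2) (pvVehAnims.foldl (fun acc t =>
        if d.contains t.2.1 && d.contains t.2.2 then
          let start := pvParse (d.getD t.2.1 "")
          let count := pvParse (d.getD t.2.2 "")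
          let names := if facings == 8 then pvVehDirs
                       else (PySem.List.pyRange 0 facings 1).map (fun i => "D" ++ PySem.Int.toStr (i + 1))
          acc ++ [(t.2.2, (PySem.List.enumerate names 0).map (fun p =>
            (p.2, PySem.List.pyRange (start + p.1 * count) (start + p.1 * count + count) 1)))]
        else acc)
        ([] : List (String × List (String × List Int))))) := by
  have key := fold_shadow_inv (pvShadow (PySem.Int.floordiv tf 2))
    (fun acc t =>
      if d.contains t.2.1 && d.contains t.2.2 then
        let start := pvParse (d.getD t.2.1 "")
        let count := pvParse (d.getD t.2.2 "")
        let inner := (PySem.List.pyRange 0 facings 1).foldl (fun acc2 i =>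
          let dir_name := if facings == 8 then PySem.List.pyGetD pvVehDirs i ""
                          else "D" ++ PySem.Int.toStr (i + 1)
          let fs := (PySem.List.pyRange 0 count 1).foldl (fun dj j =>
              (dj.1 ++ [start + i * count + j],
               dj.2 ++ [start + i * count + j + PySem.Int.floordiv tf 2]))
            (([] : List Int), ([] : List Int))
          (acc2.1 ++ [(dir_name, fs.1)], acc2.2 ++ [(dir_name, fs.2)]))
          (([] : List (String × List Int)), ([] : List (String × List Int)))
        (acc.1 ++ [(t.2.2, inner.1)], acc.2 ++ [(t.2.2, inner.2)])
      else acc)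
    (fun acc t =>
      if d.contains t.2.1 && d.contains t.2.2 then
        let start := pvParse (d.getD t.2.1 "")
        let count := pvParse (d.getD t.2.2 "")
        let names := if facings == 8 then pvVehDirs
                     else (PySem.List.pyRange 0 facings 1).map (fun i => "D" ++ PySem.Int.toStr (i + 1))
        acc ++ [(t.2.2, (PySem.List.enumerate names 0).map (fun p =>
          (p.2, PySem.List.pyRange (start + p.1 * count) (start + p.1 * count + count) 1)))]
      else acc)
    (by
      intro b t
      by_cases hc : (d.contains t.2.1 && d.contains t.2.2) = true
      · simp [hc, foldl_pair_append, map_add_pyRange, map_add_pyRange_shadow, veh1,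
              pvShadow, List.map_map, Function.comp_def]
      · simp [hc])
    pvVehAnims []
  simpa [pvShadow] using key

theorem build_frame_grid_spec : Claim_equal_build_frame_grid := by
  intro data mode facings total_frames _ _
  unfold Spec_build_frame_grid build_frame_grid build_frame_grid_alt
  by_cases hm : (mode == "Infantry") = true
  · have h1 : mode = "Infantry" := (beq_iff_eq).mp hm
    subst h1
    exact infantry_eq (PySem.Dict.ofList data) total_frames
  · by_cases hv : (mode == "Vehicle") = true
    · have h2 : mode = "Vehicle" := (beq_iff_eq).mp hv
      subst h2
      simp only [show (("Vehicle" : String) == "Infantry") = false from rfl, Bool.false_eq_true,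
        if_false]
      exact vehicle_eq (PySem.Dict.ofList data) facings total_frames
    · simp only [hm, hv, Bool.false_eq_true, if_false]
      simp [pvShadow]
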